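-- pv_equiv track=rewrite | github.com/FernandoPintoL/plataforma-educativa | convert_sql_to_xmi.py | clean_type
-- ===== SOURCE A (Python) =====
-- def clean_type(sql_type: str) -> str:
--     """Convierte tipos SQL a tipos UML primitivos"""
--     sql_type_lower = sql_type.lower()
--
--     if any(t in sql_type_lower for t in ['int', 'serial', 'bigint', 'smallint']):
--         return 'Integer'
--     elif any(t in sql_type_lower for t in ['varchar', 'char', 'text', 'character']):
--         return 'String'
--     elif any(t in sql_type_lower for t in ['bool']):
--         return 'Boolean'
--     elif any(t in sql_type_lower for t in ['float', 'double', 'decimal', 'numeric', 'real', 'precision']):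
--         return 'Real'
--     elif any(t in sql_type_lower for t in ['date', 'time', 'timestamp']):
--         return 'String'
--     elif any(t in sql_type_lower for t in ['json', 'jsonb']):
--         return 'String'
--     else:
--         return 'String'
-- ===== SOURCE B (Python) =====
-- _PRIORITY = {'int': 0, 'serial': 0, 'char': 1, 'text': 1, 'bool': 2,
--              'float': 3, 'double': 3, 'decimal': 3, 'numeric': 3, 'real': 3, 'precision': 3}
-- _RESULT = ('Integer', 'String', 'Boolean', 'Real', 'String')
--
-- def clean_type(sql_type: str) -> str:
--     # Subsumption-reduced keyword map: 'bigint'/'smallint' contain 'int',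
--     # 'varchar'/'character' contain 'char', and the date/time/json groups are
--     # dropped because they map to the default 'String' anyway.  The answer is
--     # the highest-priority (lowest-numbered) category that matches anywhere,
--     # computed as a minimum over ALL matches instead of a first-match ladder.
--     s = sql_type.lower()
--     best = min((p for kw, p in _PRIORITY.items() if kw in s), default=4)
--     return _RESULT[best]
-- ===== Notes on version B (the rewrite author's own statement) =====
-- stated objective: alternative
-- what changed: B drops the keywords subsumed by shorter ones (bigint/smallint by int, varchar/character by char) and the date/time/json groups whose result equals the default, then computes the minimum priority over ALL matching keywords of a keyword-to-priority map and indexes a result tuple, instead of A's sequential first-match if/elif ladder.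
import Mathlib
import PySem

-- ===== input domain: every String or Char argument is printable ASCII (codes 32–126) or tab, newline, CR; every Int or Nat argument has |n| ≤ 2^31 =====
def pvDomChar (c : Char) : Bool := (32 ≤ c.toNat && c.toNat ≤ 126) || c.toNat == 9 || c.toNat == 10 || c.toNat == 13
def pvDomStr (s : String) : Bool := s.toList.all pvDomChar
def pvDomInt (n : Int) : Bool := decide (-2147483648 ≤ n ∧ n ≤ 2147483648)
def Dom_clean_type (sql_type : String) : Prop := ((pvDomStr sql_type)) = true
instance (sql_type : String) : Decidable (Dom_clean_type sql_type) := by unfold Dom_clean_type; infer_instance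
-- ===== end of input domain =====

-- B: subsumption-reduced keyword→priority map and a minimum over all matches, instead of A's first-match if/elif ladder.

-- ===== PORT A =====
def clean_type (sql_type : String) : String :=
  let sql_type_lower := PySem.Str.lower sql_type
  if (["int", "serial", "bigint", "smallint"]).any (fun t => PySem.Str.isIn t sql_type_lower) then
    "Integer"
  else if (["varchar", "char", "text", "character"]).any (fun t => PySem.Str.isIn t sql_type_lower) then
    "String"
  else if (["bool"]).any (fun t => PySem.Str.isIn t sql_type_lower) then
    "Boolean"
  else if (["float", "double", "decimal", "numeric", "real", "precision"]).any (fun t => PySem.Str.isIn t sql_type_lower) then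
    "Real"
  else if (["date", "time", "timestamp"]).any (fun t => PySem.Str.isIn t sql_type_lower) then
    "String"
  else if (["json", "jsonb"]).any (fun t => PySem.Str.isIn t sql_type_lower) then
    "String"
  else
    "String"

-- ===== PORT B =====
-- _PRIORITY (dict in insertion order; only iterated, so a plain pair list is exact)
def pvPriority : List (String × Nat) :=
  [("int", 0), ("serial", 0), ("char", 1), ("text", 1), ("bool", 2),
   ("float", 3), ("double", 3), ("decimal", 3), ("numeric", 3), ("real", 3), ("precision", 3)]

def pvResult : List String := ["Integer", "String", "Boolean", "Real", "String"]

def clean_type_alt (sql_type : String) : String :=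
  let s := PySem.Str.lower sql_type
  -- min((p for kw, p in _PRIORITY.items() if kw in s), default=4): every priority is < 4,
  -- so folding Nat.min from 4 is exactly Python's min-with-default here
  let best := ((pvPriority.filter (fun kv => PySem.Str.isIn kv.1 s)).map Prod.snd).foldl Nat.min 4
  -- _RESULT[best]: best ≤ 4 always, so in-range list indexing is exact
  pvResult.getD best "String"

-- ===== PRECONDITION & SPEC =====
def Spec_clean_type (sql_type : String) (out : String) : Prop := out = clean_type_alt sql_type
instance (sql_type : String) (out : String) : Decidable (Spec_clean_type sql_type out) := by unfold Spec_clean_type; infer_instance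

-- ===== CLAIM =====
def Claim_equal_clean_type : Prop := ∀ (sql_type : String), Dom_clean_type sql_type → Spec_clean_type sql_type (clean_type sql_type)

-- ===== LEMMAS AND PROOFS =====

-- substring containment is transitive through the searched keyword
theorem pv_isIn_mono (a b s : String) (h : a.toList <:+: b.toList)
    (hb : PySem.Str.isIn b s = true) : PySem.Str.isIn a s = true := by
  rw [PySem.Str.isIn_iff_infix] at hb ⊢
  exact h.trans hb

-- ===== VERDICT =====
set_option maxHeartbeats 2000000 in
theorem clean_type_spec : Claim_equal_clean_type := by
  intro s _
  unfold Spec_clean_type clean_type clean_type_alt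
  set low := PySem.Str.lower s with hlow
  have hbig : PySem.Str.isIn "bigint" low = true → PySem.Str.isIn "int" low = true :=
    pv_isIn_mono _ _ _ (by decide)
  have hsmall : PySem.Str.isIn "smallint" low = true → PySem.Str.isIn "int" low = true :=
    pv_isIn_mono _ _ _ (by decide)
  have hvar : PySem.Str.isIn "varchar" low = true → PySem.Str.isIn "char" low = true :=
    pv_isIn_mono _ _ _ (by decide)
  have hcha : PySem.Str.isIn "character" low = true → PySem.Str.isIn "char" low = true :=
    pv_isIn_mono _ _ _ (by decide)
  -- expose the individual membership tests and drop the branches whose arms coincide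
  simp only [pvPriority, pvResult, List.filter_cons, List.filter_nil,
             List.any_cons, List.any_nil, Bool.or_false, ite_self]
  -- keywords subsumed by a shorter keyword of the same group do not change the tests
  have e1 : (PySem.Str.isIn "int" low || (PySem.Str.isIn "serial" low ||
      (PySem.Str.isIn "bigint" low || PySem.Str.isIn "smallint" low)))
      = (PySem.Str.isIn "int" low || PySem.Str.isIn "serial" low) := by
    cases hB : PySem.Str.isIn "bigint" low
    · cases hS : PySem.Str.isIn "smallint" low
      · simp only [Bool.or_false]
      · rw [hsmall hS]; simp only [Bool.true_or, Bool.or_true]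
    · rw [hbig hB]; simp only [Bool.true_or, Bool.or_true]
  have e2 : (PySem.Str.isIn "varchar" low || (PySem.Str.isIn "char" low ||
      (PySem.Str.isIn "text" low || PySem.Str.isIn "character" low)))
      = (PySem.Str.isIn "char" low || PySem.Str.isIn "text" low) := by
    cases hV : PySem.Str.isIn "varchar" low
    · cases hC : PySem.Str.isIn "character" low
      · simp only [Bool.false_or, Bool.or_false]
      · rw [hcha hC]; simp only [Bool.true_or, Bool.or_true]
    · rw [hvar hV]; simp only [Bool.true_or, Bool.or_true]
  rw [e1, e2]
  clear hbig hsmall hvar hcha e1 e2 hlow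
  -- the goal is now a closed function of the eleven remaining membership bits
  generalize PySem.Str.isIn "int" low = b1
  generalize PySem.Str.isIn "serial" low = b2
  generalize PySem.Str.isIn "char" low = b3
  generalize PySem.Str.isIn "text" low = b4
  generalize PySem.Str.isIn "bool" low = b5
  generalize PySem.Str.isIn "float" low = b6
  generalize PySem.Str.isIn "double" low = b7
  generalize PySem.Str.isIn "decimal" low = b8
  generalize PySem.Str.isIn "numeric" low = b9
  generalize PySem.Str.isIn "real" low = b10
  generalize PySem.Str.isIn "precision" low = b11
  revert b1 b2 b3 b4 b5 b6 b7 b8 b9 b10 b11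
  decide
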